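-- pv_equiv track=rewrite | github.com/TheNooB2706/broken_piano_fix | broken_piano_fix.py | initialise_vel_curve
-- ===== SOURCE A (Python) =====
-- def initialise_vel_curve(vel_curve_raw):
--     vel_curve = dict(vel_curve_raw) #making a local copy
--     if 0 not in vel_curve:
--         vel_curve[0] = 0
--     if 127 not in vel_curve:
--         vel_curve[127]=127
--     for i in vel_curve.items():
--         if not ((0 <= i[0] <= 127) and (0 <= i[1] <= 127)):
--             raise ValueError(f"MIDI velocity in velocity curve out of range: {i[0]}:{i[1]}")
--     vel_curve = dict(sorted(vel_curve.items(), key=lambda x:x[0])) #sorting velocity curve dictionary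
--
--     temp_vel_list = [i for i in vel_curve.items()]
--     for i in range(len(temp_vel_list)-1): #generating lookup table for mapping
--         lower = temp_vel_list[i] #lower bound, tuple in the form of (input, mapped output)
--         upper = temp_vel_list[i+1] #upper bound
--         for j in range(lower[0]+1, upper[0]): #j is the input value
--             mapped_output = round((j-lower[0])*(upper[1]-lower[1])/(upper[0]-lower[0])+lower[1]) #classic y=mx+c
--             vel_curve[j] = mapped_output #appending into dictionary
--     vel_curve = dict(sorted(vel_curve.items(), key=lambda x:x[0])) #resorting, technically not needed but just do it anyway
--     return vel_curve
-- ===== SOURCE B (Python) =====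
-- def initialise_vel_curve(vel_curve_raw):
--     vel_curve = dict(vel_curve_raw)  # local copy, last duplicate wins
--     if 0 not in vel_curve:
--         vel_curve[0] = 0
--     if 127 not in vel_curve:
--         vel_curve[127] = 127
--     for i in vel_curve.items():
--         if not ((0 <= i[0] <= 127) and (0 <= i[1] <= 127)):
--             raise ValueError(f"MIDI velocity in velocity curve out of range: {i[0]}:{i[1]}")
--     points = sorted(vel_curve.items(), key=lambda x: x[0])
--     result = {}
--     k = 0  # index of the control point bracketing j from below
--     for j in range(128):
--         if k + 1 < len(points) and j == points[k + 1][0]: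
--             k += 1
--         lower = points[k]
--         if j == lower[0]:
--             result[j] = lower[1]  # control point: copy its value verbatim
--         else:
--             upper = points[k + 1]
--             result[j] = round((j - lower[0]) * (upper[1] - lower[1]) / (upper[0] - lower[0]) + lower[1])
--     return result
-- ===== Notes on version B (the rewrite author's own statement) =====
-- stated objective: alternative
-- what changed: Replaces A's nested per-segment insertion loops into a dict followed by a full re-sort of the 128-entry table with a single forward pass over j=0..127 that advances an index into the sorted control-point list (always holding the bracketing pair) and emits the table directly in ascending key order, copying control values verbatim.
import Mathlib
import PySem

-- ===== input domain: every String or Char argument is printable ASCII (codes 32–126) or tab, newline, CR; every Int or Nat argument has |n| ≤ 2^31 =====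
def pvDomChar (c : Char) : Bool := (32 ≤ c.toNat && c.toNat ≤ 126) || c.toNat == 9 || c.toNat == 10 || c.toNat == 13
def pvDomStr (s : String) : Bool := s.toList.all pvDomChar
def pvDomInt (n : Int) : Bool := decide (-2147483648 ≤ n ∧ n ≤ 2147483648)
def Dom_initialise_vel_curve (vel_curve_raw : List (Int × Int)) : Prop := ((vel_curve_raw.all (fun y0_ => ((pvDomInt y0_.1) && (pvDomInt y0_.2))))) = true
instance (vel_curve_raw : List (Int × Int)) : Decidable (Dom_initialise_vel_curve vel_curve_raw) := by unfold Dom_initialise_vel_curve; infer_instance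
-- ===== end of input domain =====

-- B replaces A's nested segment loops plus a final re-sort by one forward pass over j = 0..127 that
-- advances an index into the sorted control-point list, emitting the table already in ascending order
-- (objective: alternative decomposition, same O(1)-size table cost).

-- Shared model of Python's round() on the interpolation expression: round-half-even of num/den.
-- Exact here: both programs only call it with |values| ≤ 127·127+127·127 and 0 < den ≤ 127, where the
-- float expression round((j-l0)*(u1-l1)/(u0-l0)+l1) equals round-half-even of the exact rational.
def pvRound (num den : Int) : Int :=
  let q := PySem.Int.floordiv num den
  let r := PySem.Int.mod num den
  if 2 * r < den then q
  else if den < 2 * r then q + 1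
  else if PySem.Int.mod q 2 = 0 then q else q + 1

-- ===== PORT A =====
def initialise_vel_curve (vel_curve_raw : List (Int × Int)) : List (Int × Int) :=
  let vc0 := PySem.Dict.ofList vel_curve_raw            -- vel_curve = dict(vel_curve_raw)
  let vc1 := if vc0.contains 0 then vc0 else vc0.insert 0 0
  let vc2 := if vc1.contains 127 then vc1 else vc1.insert 127 127
  if vc2.items.all (fun i => decide ((0 ≤ i.1 ∧ i.1 ≤ 127) ∧ (0 ≤ i.2 ∧ i.2 ≤ 127))) then
    let vc3 := PySem.Dict.ofList (PySem.List.sorted vc2.items (fun x => x.1))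
    let temp := vc3.items                               -- temp_vel_list
    let vc4 := (PySem.List.pyRange 0 ((temp.length : Int) - 1)).foldl (fun d i =>
      let lower := PySem.List.pyGetD temp i (0, 0)
      let upper := PySem.List.pyGetD temp (i + 1) (0, 0)
      (PySem.List.pyRange (lower.1 + 1) upper.1).foldl
        (fun d j =>
          d.insert j (pvRound ((j - lower.1) * (upper.2 - lower.2) + lower.2 * (upper.1 - lower.1))
            (upper.1 - lower.1))) d) vc3
    (PySem.Dict.ofList (PySem.List.sorted vc4.items (fun x => x.1))).items
  else []  -- Python raises ValueError here (excluded by Pre_)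

-- B-side helper: the body of Source B's forward pass (one j step)
def pvBodyB (points : List (Int × Int)) (st : Int × PySem.Dict Int Int) (j : Int) :
    Int × PySem.Dict Int Int :=
  let k := if st.1 + 1 < (points.length : Int) ∧ (PySem.List.pyGetD points (st.1 + 1) (0, 0)).1 = j
           then st.1 + 1 else st.1
  let lower := PySem.List.pyGetD points k (0, 0)
  if j = lower.1 then (k, st.2.insert j lower.2)    -- control point: copy its value verbatim
  else
    let upper := PySem.List.pyGetD points (k + 1) (0, 0)
    (k, st.2.insert j (pvRound ((j - lower.1) * (upper.2 - lower.2) + lower.2 * (upper.1 - lower.1))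
      (upper.1 - lower.1)))

-- ===== PORT B =====
def initialise_vel_curve_alt (vel_curve_raw : List (Int × Int)) : List (Int × Int) :=
  let d0 := PySem.Dict.ofList vel_curve_raw             -- local copy, last duplicate wins
  let d1 := if d0.contains 0 then d0 else d0.insert 0 0
  let d2 := if d1.contains 127 then d1 else d1.insert 127 127
  if d2.items.all (fun i => decide ((0 ≤ i.1 ∧ i.1 ≤ 127) ∧ (0 ≤ i.2 ∧ i.2 ≤ 127))) then
    let points := PySem.List.sorted d2.items (fun x => x.1)
    let fin := (PySem.List.pyRange 0 128).foldl (pvBodyB points) ((0 : Int), PySem.Dict.empty)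
    fin.2.items
  else []  -- Python raises ValueError here (excluded by Pre_)

-- ===== PRECONDITION & SPEC =====
-- Pre_ excludes exactly the inputs where Python raises ValueError: some control-point key is outside
-- 0..127, or the surviving (last) value stored under some key is outside 0..127.
def Pre_initialise_vel_curve (vel_curve_raw : List (Int × Int)) : Prop :=
  ∀ i, (hi : i < vel_curve_raw.length) →
    (0 ≤ vel_curve_raw[i].1 ∧ vel_curve_raw[i].1 ≤ 127) ∧
    ((∀ j, (hj : j < vel_curve_raw.length) → i < j → vel_curve_raw[j].1 ≠ vel_curve_raw[i].1) →
      (0 ≤ vel_curve_raw[i].2 ∧ vel_curve_raw[i].2 ≤ 127))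
instance (vel_curve_raw : List (Int × Int)) : Decidable (Pre_initialise_vel_curve vel_curve_raw) := by
  unfold Pre_initialise_vel_curve; infer_instance
def pvWitness_initialise_vel_curve : (List (Int × Int)) := [(10, 20), (50, 100)]

def Spec_initialise_vel_curve (vel_curve_raw : List (Int × Int)) (out : List (Int × Int)) : Prop := out = initialise_vel_curve_alt vel_curve_raw
instance (vel_curve_raw : List (Int × Int)) (out : List (Int × Int)) : Decidable (Spec_initialise_vel_curve vel_curve_raw out) := by unfold Spec_initialise_vel_curve; infer_instance

-- ===== CLAIM (what is proved, stated in full; the proofs are below) =====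
def Claim_equal_initialise_vel_curve : Prop := ∀ (vel_curve_raw : List (Int × Int)), Dom_initialise_vel_curve vel_curve_raw → Pre_initialise_vel_curve vel_curve_raw → Spec_initialise_vel_curve vel_curve_raw (initialise_vel_curve vel_curve_raw)

-- ===== LEMMAS AND PROOFS =====

-- the interpolated open segment between consecutive control points p and q
def pvSeg (p q : Int × Int) : List (Int × Int) :=
  (PySem.List.pyRange (p.1 + 1) q.1).map (fun j =>
    (j, pvRound ((j - p.1) * (q.2 - p.2) + p.2 * (q.1 - p.1)) (q.1 - p.1)))

-- all interpolated segments of a control list (consecutive pairs)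
def pvSegs : List (Int × Int) → List (Int × Int)
  | p :: q :: r => pvSeg p q ++ pvSegs (q :: r)
  | _ => []

-- the full table in ascending key order
def pvBuild : List (Int × Int) → List (Int × Int)
  | p :: q :: r => (p :: pvSeg p q) ++ pvBuild (q :: r)
  | l => l

lemma pv_items_ofList (ps : List (Int × Int)) (h : (ps.map Prod.fst).Nodup) :
    (PySem.Dict.ofList ps).items = ps := by
  have := PySem.Dict.items_foldl_insert_fresh (κ := Int) (ν := Int) ps Prod.fst Prod.snd
    PySem.Dict.empty (by intro a _; simp [PySem.Dict.contains_empty]) h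
  simpa [PySem.Dict.ofList, PySem.Dict.update] using this

lemma pv_get?_foldl_insert (ps : List (Int × Int)) (d : PySem.Dict Int Int) (k : Int) :
    (ps.foldl (fun acc p => acc.insert p.1 p.2) d).get? k =
      ps.foldl (fun acc p => if p.1 = k then some p.2 else acc) (d.get? k) := by
  induction ps generalizing d with
  | nil => rfl
  | cons p t ih =>
      simp only [List.foldl_cons, ih, PySem.Dict.get?_insert]
      by_cases h : p.1 = k
      · subst h; simp
      · rw [if_neg (fun h' => h h'.symm), if_neg h]

lemma pv_get?_ofList (ps : List (Int × Int)) (k : Int) :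
    (PySem.Dict.ofList ps).get? k =
      ps.foldl (fun acc p => if p.1 = k then some p.2 else acc) none := by
  have := pv_get?_foldl_insert ps PySem.Dict.empty k
  simpa [PySem.Dict.ofList, PySem.Dict.update, PySem.Dict.get?_empty] using this

-- a last-match foldl result comes from a final occurrence
lemma pv_foldl_lastMatch (ps : List (Int × Int)) (k v : Int)
    (h : ps.foldl (fun acc p => if p.1 = k then some p.2 else acc) none = some v) :
    ∃ i, ∃ hi : i < ps.length, ps[i].1 = k ∧ ps[i].2 = v ∧
      ∀ j, (hj : j < ps.length) → i < j → ps[j].1 ≠ k := by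
  induction ps using List.reverseRecOn with
  | nil => simp at h
  | append_singleton qs q ih =>
      rw [List.foldl_append, List.foldl_cons, List.foldl_nil] at h
      by_cases hq : q.1 = k
      · rw [if_pos hq] at h
        refine ⟨qs.length, by simp, ?_, ?_, ?_⟩
        · simpa using hq
        · simpa using (Option.some.inj h)
        · intro j hj hlt; simp at hj; omega
      · rw [if_neg hq] at h
        obtain ⟨i, hi, h1, h2, h3⟩ := ih h
        refine ⟨i, by simp; omega, ?_, ?_, ?_⟩
        · rwa [List.getElem_append_left hi]
        · rwa [List.getElem_append_left hi]
        · intro j hj hlt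
          rcases lt_or_ge j qs.length with hj' | hj'
          · rw [List.getElem_append_left hj']; exact h3 j hj' hlt
          · have : j = qs.length := by simp at hj; omega
            subst this
            simpa using hq

-- the dict after the two default insertions (shape shared verbatim by both ports)
def pvD2 (raw : List (Int × Int)) : PySem.Dict Int Int :=
  let vc0 := PySem.Dict.ofList raw
  let vc1 := if vc0.contains 0 then vc0 else vc0.insert 0 0
  if vc1.contains 127 then vc1 else vc1.insert 127 127

def pvPts (raw : List (Int × Int)) : List (Int × Int) :=
  PySem.List.sorted (pvD2 raw).items (fun x => x.1)

def pvInRange (p : Int × Int) : Prop := (0 ≤ p.1 ∧ p.1 ≤ 127) ∧ (0 ≤ p.2 ∧ p.2 ≤ 127)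

lemma pv_items_ofList_range (raw : List (Int × Int)) (hpre : Pre_initialise_vel_curve raw) :
    ∀ p ∈ (PySem.Dict.ofList raw).items, pvInRange p := by
  intro p hp
  have hnd := PySem.Dict.nodup_keys_ofList (κ := Int) (ν := Int) raw
  have hget : (PySem.Dict.ofList raw).get? p.1 = some p.2 :=
    PySem.Dict.get?_of_mem_items _ (by simpa using hp) hnd
  rw [pv_get?_ofList] at hget
  obtain ⟨i, hi, h1, h2, h3⟩ := pv_foldl_lastMatch _ _ _ hget
  obtain ⟨hk, hv⟩ := hpre i hi
  refine ⟨by rw [← h1]; exact hk, ?_⟩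
  rw [← h2]
  apply hv
  intro j hj hlt
  rw [h1]
  exact h3 j hj hlt

lemma pv_items_pvD2_range (raw : List (Int × Int)) (hpre : Pre_initialise_vel_curve raw) :
    ∀ p ∈ (pvD2 raw).items, pvInRange p := by
  have base := pv_items_ofList_range raw hpre
  have range0 : pvInRange ((0 : Int), (0 : Int)) := by constructor <;> norm_num
  have range127 : pvInRange ((127 : Int), (127 : Int)) := by constructor <;> norm_num
  intro p hp
  unfold pvD2 at hp
  simp only at hp
  have step1 : ∀ q ∈ (if (PySem.Dict.ofList raw).contains 0 then PySem.Dict.ofList raw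
      else (PySem.Dict.ofList raw).insert 0 0).items, pvInRange q := by
    intro q hq
    by_cases c0 : (PySem.Dict.ofList raw).contains 0 = true
    · rw [if_pos c0] at hq; exact base q hq
    · rw [if_neg c0, PySem.Dict.items_insert_of_not_contains _ _ (by simpa using c0)] at hq
      rcases List.mem_append.1 hq with h | h
      · exact base q h
      · rw [List.mem_singleton.1 h]; exact range0
  by_cases c127 : (if (PySem.Dict.ofList raw).contains 0 then PySem.Dict.ofList raw
      else (PySem.Dict.ofList raw).insert 0 0).contains 127 = true
  · rw [if_pos c127] at hp; exact step1 p hp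
  · rw [if_neg c127, PySem.Dict.items_insert_of_not_contains _ _ (by simpa using c127)] at hp
    rcases List.mem_append.1 hp with h | h
    · exact step1 p h
    · rw [List.mem_singleton.1 h]; exact range127

lemma pv_pyRange_pairwise (a b : Int) : (PySem.List.pyRange a b).Pairwise (· < ·) := by
  unfold PySem.List.pyRange
  rw [if_neg one_ne_zero, List.pairwise_map]
  exact (List.pairwise_lt_range).imp (by intro k k' h; omega)

lemma pv_pyRange_nodup (a b : Int) : (PySem.List.pyRange a b).Nodup :=
  (pv_pyRange_pairwise a b).imp ne_of_lt

lemma pv_nodup_keys_pvD2 (raw : List (Int × Int)) : (pvD2 raw).keys.Nodup := by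
  unfold pvD2
  simp only
  split <;> split <;>
    first
      | exact PySem.Dict.nodup_keys_ofList raw
      | exact PySem.Dict.nodup_keys_insert _ _ _ (PySem.Dict.nodup_keys_ofList raw)
      | exact PySem.Dict.nodup_keys_insert _ _ _
          (PySem.Dict.nodup_keys_insert _ _ _ (PySem.Dict.nodup_keys_ofList raw))

lemma pv_contains_pvD2 (raw : List (Int × Int)) :
    (pvD2 raw).contains 0 = true ∧ (pvD2 raw).contains 127 = true := by
  unfold pvD2
  simp only
  set d0 := PySem.Dict.ofList raw with hd0
  set d1 := if d0.contains 0 then d0 else d0.insert 0 0 with hd1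
  have h1 : d1.contains 0 = true := by
    rw [hd1]; split
    · assumption
    · rw [PySem.Dict.contains_insert]; simp
  constructor
  · by_cases c : d1.contains 127 = true
    · rw [if_pos c]; exact h1
    · rw [if_neg c, PySem.Dict.contains_insert, h1]; simp
  · by_cases c : d1.contains 127 = true
    · rw [if_pos c]; exact c
    · rw [if_neg c, PySem.Dict.contains_insert]; simp

lemma pv_pts_perm (raw : List (Int × Int)) : (pvPts raw).Perm (pvD2 raw).items :=
  PySem.List.sorted_perm _ _ _

lemma pv_pts_nodup_fst (raw : List (Int × Int)) : ((pvPts raw).map Prod.fst).Nodup := by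
  have h : (pvD2 raw).items.map Prod.fst = (pvD2 raw).keys := rfl
  exact (((pv_pts_perm raw).map Prod.fst).nodup_iff).2 (h ▸ pv_nodup_keys_pvD2 raw)

lemma pv_pts_pairwise (raw : List (Int × Int)) :
    (pvPts raw).Pairwise (fun a b => a.1 < b.1) := by
  have hle := PySem.List.sorted_pairwise (pvD2 raw).items (fun x => x.1)
  have hne : (pvPts raw).Pairwise (fun a b => a.1 ≠ b.1) :=
    List.pairwise_map.mp (pv_pts_nodup_fst raw)
  exact (hle.and hne).imp (fun h => lt_of_le_of_ne h.1 h.2)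

lemma pv_pts_range (raw : List (Int × Int)) (hpre : Pre_initialise_vel_curve raw) :
    ∀ p ∈ pvPts raw, pvInRange p :=
  fun p hp => pv_items_pvD2_range raw hpre p ((pv_pts_perm raw).mem_iff.1 hp)

lemma pv_pts_mem_key (raw : List (Int × Int)) :
    0 ∈ (pvPts raw).map Prod.fst ∧ 127 ∈ (pvPts raw).map Prod.fst := by
  obtain ⟨h0, h127⟩ := pv_contains_pvD2 raw
  rw [PySem.Dict.contains_iff_mem_keys] at h0 h127
  have hmap := (pv_pts_perm raw).map Prod.fst
  exact ⟨hmap.mem_iff.2 h0, hmap.mem_iff.2 h127⟩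

lemma pv_pts_len (raw : List (Int × Int)) : 2 ≤ (pvPts raw).length := by
  obtain ⟨h0, h127⟩ := pv_pts_mem_key raw
  obtain ⟨p, hp, hp0⟩ := List.mem_map.1 h0
  obtain ⟨q, hq, hq127⟩ := List.mem_map.1 h127
  match hl : pvPts raw with
  | [] => rw [hl] at hp; exact absurd hp (List.not_mem_nil)
  | [a] =>
      rw [hl] at hp hq
      rw [List.mem_singleton.1 hp] at hp0
      rw [List.mem_singleton.1 hq] at hq127
      omega
  | a :: b :: t => simp

lemma pv_key_mono (raw : List (Int × Int)) :
    ∀ i j : ℕ, (hij : i < j) → (hj : j < (pvPts raw).length) →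
      ((pvPts raw)[i]'(by omega)).1 < (pvPts raw)[j].1 := by
  intro i j hij hj
  exact (List.pairwise_iff_getElem.1 (pv_pts_pairwise raw)) i j _ hj hij

lemma pv_pts_head (raw : List (Int × Int)) (hpre : Pre_initialise_vel_curve raw) :
    ((pvPts raw)[0]'(by have := pv_pts_len raw; omega)).1 = 0 := by
  obtain ⟨h0, _⟩ := pv_pts_mem_key raw
  obtain ⟨p, hp, hp0⟩ := List.mem_map.1 h0
  obtain ⟨m, hm, rfl⟩ := List.mem_iff_getElem.1 hp
  rcases Nat.eq_zero_or_pos m with rfl | hpos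
  · exact hp0
  · have := pv_key_mono raw 0 m hpos hm
    have hmem : (pvPts raw)[0]'(by omega) ∈ pvPts raw := List.getElem_mem _
    have := (pv_pts_range raw hpre _ hmem).1.1
    omega

lemma pv_pts_last (raw : List (Int × Int)) (hpre : Pre_initialise_vel_curve raw) :
    ((pvPts raw)[(pvPts raw).length - 1]'(by have := pv_pts_len raw; omega)).1 = 127 := by
  obtain ⟨_, h127⟩ := pv_pts_mem_key raw
  obtain ⟨p, hp, hp127⟩ := List.mem_map.1 h127
  obtain ⟨m, hm, rfl⟩ := List.mem_iff_getElem.1 hp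
  rcases Nat.lt_or_ge m ((pvPts raw).length - 1) with hlt | hge
  · have := pv_key_mono raw m ((pvPts raw).length - 1) hlt (by omega)
    have hmem : (pvPts raw)[(pvPts raw).length - 1]'(by omega) ∈ pvPts raw := List.getElem_mem _
    have := (pv_pts_range raw hpre _ hmem).1.2
    omega
  · have : m = (pvPts raw).length - 1 := by omega
    subst this
    exact hp127

-- a key strictly between two consecutive control keys is not a control key
lemma pv_between_not_mem (pts : List (Int × Int)) (hpw : pts.Pairwise (fun a b => a.1 < b.1))
    (i : ℕ) (hi : i + 1 < pts.length) (j : Int)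
    (hlo : (pts[i]'(by omega)).1 < j) (hhi : j < pts[i + 1].1) :
    j ∉ pts.map Prod.fst := by
  intro hmem
  obtain ⟨p, hp, hpj⟩ := List.mem_map.1 hmem
  obtain ⟨m, hm, rfl⟩ := List.mem_iff_getElem.1 hp
  have hmono := List.pairwise_iff_getElem.1 hpw
  rcases Nat.lt_or_ge m (i + 1) with hle | hgt
  · rcases Nat.lt_or_ge m i with hlt | hge
    · have := hmono m i (by omega) (by omega) hlt
      omega
    · have : m = i := by omega
      subst this
      omega
  · rcases Nat.lt_or_ge (i + 1) m with hlt | hge'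
    · have := hmono (i + 1) m (by omega) hm hlt
      omega
    · have : m = i + 1 := by omega
      subst this
      omega

lemma pv_guard_true (raw : List (Int × Int)) (hpre : Pre_initialise_vel_curve raw) :
    (pvD2 raw).items.all (fun i => decide ((0 ≤ i.1 ∧ i.1 ≤ 127) ∧ (0 ≤ i.2 ∧ i.2 ≤ 127))) = true := by
  rw [List.all_eq_true]
  intro p hp
  simpa [pvInRange] using pv_items_pvD2_range raw hpre p hp

lemma pv_pyRange_eq_nil {a b : Int} (h : b ≤ a) : PySem.List.pyRange a b = [] := by
  rw [List.eq_nil_iff_forall_not_mem]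
  intro x hx
  rw [PySem.List.mem_pyRange_one] at hx
  omega

lemma pv_segs_short (l : List (Int × Int)) (h : l.length ≤ 1) : pvSegs l = [] := by
  match l with
  | [] => rfl
  | [p] => rfl
  | p :: q :: r => simp at h

lemma pv_A_fold (pts : List (Int × Int)) (hpw : pts.Pairwise (fun a b => a.1 < b.1)) :
    ∀ (fuel i : ℕ) (d : PySem.Dict Int Int), pts.length - 1 - i = fuel →
    d.keys.Nodup →
    (∀ k ∈ d.keys, k ∈ pts.map Prod.fst ∨
      ∃ m, ∃ _ : m + 1 < pts.length, m < i ∧ (pts[m]'(by omega)).1 < k ∧ k < pts[m + 1].1) →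
    ((PySem.List.pyRange (i : Int) ((pts.length : Int) - 1)).foldl
      (fun d i =>
        let lower := PySem.List.pyGetD pts i (0, 0)
        let upper := PySem.List.pyGetD pts (i + 1) (0, 0)
        (PySem.List.pyRange (lower.1 + 1) upper.1).foldl
          (fun d j => d.insert j (pvRound ((j - lower.1) * (upper.2 - lower.2) + lower.2 * (upper.1 - lower.1)) (upper.1 - lower.1))) d) d).items
      = d.items ++ pvSegs (pts.drop i) := by
  intro fuel
  induction fuel with
  | zero =>
      intro i d hfuel hnd hkeys
      rw [pv_pyRange_eq_nil (by omega), List.foldl_nil,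
        pv_segs_short _ (by rw [List.length_drop]; omega), List.append_nil]
  | succ fuel ih =>
      intro i d hfuel hnd hkeys
      have hi1 : i + 1 < pts.length := by omega
      have hi : i < pts.length := by omega
      rw [PySem.List.pyRange_one_cons (by omega), List.foldl_cons]
      simp only
      rw [PySem.List.pyGetD_of_nonneg pts (0, 0) (Int.natCast_nonneg i),
          show ((i : Int) + 1) = ((i + 1 : ℕ) : Int) by push_cast; ring,
          PySem.List.pyGetD_of_nonneg pts (0, 0) (Int.natCast_nonneg (i + 1)),
          Int.toNat_natCast, Int.toNat_natCast,
          List.getD_eq_getElem pts _ hi, List.getD_eq_getElem pts _ hi1]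
      set a := (pts[i]'hi).1 with ha
      set c := (pts[i + 1]'hi1).1 with hc
      have hac : a < c := List.pairwise_iff_getElem.1 hpw i (i + 1) hi hi1 (by omega)
      -- the inner loop inserts only fresh, distinct keys
      have hfresh : ∀ j ∈ PySem.List.pyRange (a + 1) c, d.contains j = false := by
        intro j hj
        rw [PySem.List.mem_pyRange_one] at hj
        by_contra hcon
        have hjk : j ∈ d.keys := by
          rw [← PySem.Dict.contains_iff_mem_keys]
          revert hcon
          cases d.contains j <;> simp
        rcases hkeys j hjk with hmem | ⟨m, hm1, hmi, hlo, hhi⟩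
        · exact pv_between_not_mem pts hpw i hi1 j (by omega) (by omega) hmem
        · have : (pts[m + 1]'hm1).1 ≤ a := by
            rcases Nat.lt_or_ge (m + 1) i with hlt | hge
            · exact le_of_lt (List.pairwise_iff_getElem.1 hpw (m + 1) i hm1 hi hlt)
            · have : m + 1 = i := by omega
              subst this; exact le_refl _
          omega
      have hinner := PySem.Dict.items_foldl_insert_fresh
        (PySem.List.pyRange (a + 1) c) (fun j => j)
        (fun j => pvRound ((j - a) * ((pts[i + 1]'hi1).2 - (pts[i]'hi).2) + (pts[i]'hi).2 * (c - a)) (c - a)) d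
        hfresh (by rw [List.map_id']; exact pv_pyRange_nodup _ _)
      set d' := (PySem.List.pyRange (a + 1) c).foldl
        (fun d j => d.insert j (pvRound ((j - a) * ((pts[i + 1]'hi1).2 - (pts[i]'hi).2) + (pts[i]'hi).2 * (c - a)) (c - a))) d with hd'
      have hkeys' : d'.keys = PySem.Set.update d.keys (PySem.List.pyRange (a + 1) c) := by
        rw [hd']; exact PySem.Dict.keys_foldl_insert _ _ _
      have hnd' : d'.keys.Nodup := by
        rw [hd']; exact PySem.Dict.nodup_keys_foldl_insert _ _ _ hnd
      have hinv' : ∀ k ∈ d'.keys, k ∈ pts.map Prod.fst ∨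
          ∃ m, ∃ _ : m + 1 < pts.length, m < i + 1 ∧ (pts[m]'(by omega)).1 < k ∧ k < pts[m + 1].1 := by
        intro k hk
        rw [hkeys', PySem.Set.mem_update] at hk
        rcases hk with hk | hk
        · rcases hkeys k hk with h | ⟨m, h1, h2, h3, h4⟩
          · exact Or.inl h
          · exact Or.inr ⟨m, h1, by omega, h3, h4⟩
        · rw [PySem.List.mem_pyRange_one] at hk
          exact Or.inr ⟨i, hi1, by omega, by omega, by omega⟩
      have hstep := ih (i + 1) d' (by omega) hnd' hinv'
      rw [hstep, hinner]
      rw [List.drop_eq_getElem_cons hi, List.drop_eq_getElem_cons hi1]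
      show d.items ++ List.map _ _ ++ pvSegs _ = d.items ++ pvSegs ((pts[i]'hi) :: (pts[i + 1]'hi1) :: pts.drop (i + 2))
      rw [show pvSegs ((pts[i]'hi) :: (pts[i + 1]'hi1) :: pts.drop (i + 2))
          = pvSeg (pts[i]'hi) (pts[i + 1]'hi1) ++ pvSegs ((pts[i + 1]'hi1) :: pts.drop (i + 2)) from rfl]
      rw [← List.append_assoc]
      rfl

lemma pv_seg_keys (p q : Int × Int) : ∀ x ∈ pvSeg p q, p.1 < x.1 ∧ x.1 < q.1 := by
  intro x hx
  obtain ⟨j, hj, rfl⟩ := List.mem_map.1 hx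
  rw [PySem.List.mem_pyRange_one] at hj
  exact ⟨by omega, by omega⟩

lemma pv_build_perm (l : List (Int × Int)) : (pvBuild l).Perm (l ++ pvSegs l) := by
  match l with
  | [] => rfl
  | [p] => rfl
  | p :: q :: r =>
      show ((p :: pvSeg p q) ++ pvBuild (q :: r)).Perm
        ((p :: q :: r) ++ (pvSeg p q ++ pvSegs (q :: r)))
      have ih := pv_build_perm (q :: r)
      refine List.Perm.trans (List.Perm.cons p (List.Perm.append_left (pvSeg p q) ih)) ?_
      refine List.Perm.cons p ?_
      exact List.perm_append_comm_assoc _ _ _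

lemma pv_build_lb : ∀ (l : List (Int × Int)), l.Pairwise (fun a b => a.1 < b.1) →
    ∀ x ∈ pvBuild l, ∀ h : l ≠ [], (l.head h).1 ≤ x.1
  | [] => by intro _ x hx h; exact absurd rfl h
  | [p] => by
      intro _ x hx _
      rw [show pvBuild [p] = [p] from rfl, List.mem_singleton] at hx
      rw [hx, List.head_cons]
  | p :: q :: r => by
      intro hpw x hx _
      rw [List.head_cons]
      rw [show pvBuild (p :: q :: r) = (p :: pvSeg p q) ++ pvBuild (q :: r) from rfl] at hx
      rcases List.mem_append.1 hx with hx | hx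
      · rcases List.mem_cons.1 hx with rfl | hx
        · exact le_refl _
        · exact le_of_lt (pv_seg_keys p q x hx).1
      · have hq : p.1 < q.1 := (List.pairwise_cons.1 hpw).1 q (by simp)
        have := pv_build_lb (q :: r) (List.pairwise_cons.1 hpw).2 x hx (by simp)
        rw [List.head_cons] at this
        omega

lemma pv_build_pairwise (l : List (Int × Int)) (hpw : l.Pairwise (fun a b => a.1 < b.1)) :
    (pvBuild l).Pairwise (fun a b => a.1 < b.1) := by
  match l with
  | [] => exact List.Pairwise.nil
  | [p] => simp [show pvBuild [p] = [p] from rfl]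
  | p :: q :: r =>
      rw [show pvBuild (p :: q :: r) = (p :: pvSeg p q) ++ pvBuild (q :: r) from rfl]
      have htail := (List.pairwise_cons.1 hpw).2
      have hpq : p.1 < q.1 := (List.pairwise_cons.1 hpw).1 q (by simp)
      rw [List.pairwise_append]
      refine ⟨?_, pv_build_pairwise (q :: r) htail, ?_⟩
      · rw [List.pairwise_cons]
        refine ⟨fun x hx => (pv_seg_keys p q x hx).1, ?_⟩
        unfold pvSeg
        rw [List.pairwise_map]
        exact (pv_pyRange_pairwise _ _).imp (by intro a b h; simpa using h)
      · intro x hx y hy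
        have hyl : q.1 ≤ y.1 := by
          have := pv_build_lb (q :: r) htail y hy (by simp)
          rwa [List.head_cons] at this
        rcases List.mem_cons.1 hx with rfl | hx
        · omega
        · have := (pv_seg_keys p q x hx).2
          omega

lemma pv_build_nodup_fst (l : List (Int × Int)) (hpw : l.Pairwise (fun a b => a.1 < b.1)) :
    ((pvBuild l).map Prod.fst).Nodup :=
  List.pairwise_map.mpr ((pv_build_pairwise l hpw).imp fun h => ne_of_lt h)

lemma pv_A_eq (raw : List (Int × Int)) (hpre : Pre_initialise_vel_curve raw) :
    initialise_vel_curve raw = pvBuild (pvPts raw) := by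
  have hg := pv_guard_true raw hpre
  have hpw := pv_pts_pairwise raw
  have htemp : (PySem.Dict.ofList (pvPts raw)).items = pvPts raw :=
    pv_items_ofList _ (pv_pts_nodup_fst raw)
  have step0 : initialise_vel_curve raw =
      (if (pvD2 raw).items.all (fun i => decide ((0 ≤ i.1 ∧ i.1 ≤ 127) ∧ (0 ≤ i.2 ∧ i.2 ≤ 127))) = true then
        (let temp := (PySem.Dict.ofList (pvPts raw)).items
         (PySem.Dict.ofList (PySem.List.sorted
           ((PySem.List.pyRange 0 ((temp.length : Int) - 1)).foldl (fun d i =>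
             let lower := PySem.List.pyGetD temp i (0, 0)
             let upper := PySem.List.pyGetD temp (i + 1) (0, 0)
             (PySem.List.pyRange (lower.1 + 1) upper.1).foldl
               (fun d j => d.insert j (pvRound ((j - lower.1) * (upper.2 - lower.2) + lower.2 * (upper.1 - lower.1)) (upper.1 - lower.1))) d)
             (PySem.Dict.ofList (pvPts raw))).items (fun x => x.1))).items)
      else []) := rfl
  rw [step0, if_pos hg]
  simp only [htemp]
  have hfold := pv_A_fold (pvPts raw) hpw ((pvPts raw).length - 1) 0
    (PySem.Dict.ofList (pvPts raw)) (by omega)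
    (PySem.Dict.nodup_keys_ofList _)
    (by intro k hk
        left
        have : (PySem.Dict.ofList (pvPts raw)).keys = (PySem.Dict.ofList (pvPts raw)).items.map Prod.fst := rfl
        rw [this, htemp] at hk
        exact hk)
  rw [Nat.cast_zero] at hfold
  rw [hfold, htemp, List.drop_zero]
  have hsorted : PySem.List.sorted (pvPts raw ++ pvSegs (pvPts raw)) (fun x => x.1) = pvBuild (pvPts raw) :=
    PySem.List.sorted_eq_of_perm_of_pairwise_lt _ _ _ (pv_build_perm _) (pv_build_pairwise _ hpw)
  rw [hsorted]
  exact pv_items_ofList _ (pv_build_nodup_fst _ hpw)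

lemma pv_getD_cast (pts : List (Int × Int)) (i : ℕ) (hi : i < pts.length) :
    PySem.List.pyGetD pts (i : Int) (0, 0) = pts[i] := by
  rw [PySem.List.pyGetD_of_nonneg pts (0, 0) (Int.natCast_nonneg i), Int.toNat_natCast,
    List.getD_eq_getElem pts _ hi]

lemma pv_B_step_mid (pts : List (Int × Int)) (i : ℕ) (hi1 : i + 1 < pts.length) (j : Int)
    (hlo : (pts[i]'(by omega)).1 < j) (hhi : j < pts[i + 1].1) (res : PySem.Dict Int Int) :
    pvBodyB pts ((i : Int), res) j =
      ((i : Int), res.insert j (pvRound ((j - (pts[i]'(by omega)).1) * (pts[i + 1].2 - (pts[i]'(by omega)).2)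
        + (pts[i]'(by omega)).2 * (pts[i + 1].1 - (pts[i]'(by omega)).1)) (pts[i + 1].1 - (pts[i]'(by omega)).1))) := by
  unfold pvBodyB
  simp only
  rw [show ((i : Int) + 1) = ((i + 1 : ℕ) : Int) by push_cast; ring]
  rw [pv_getD_cast pts (i + 1) hi1]
  rw [if_neg (show ¬(((i + 1 : ℕ) : Int) < (pts.length : Int) ∧ (pts[i + 1]'hi1).1 = j) from by
    rintro ⟨-, h⟩; omega)]
  rw [pv_getD_cast pts i (by omega)]
  rw [if_neg (show ¬(j = (pts[i]'(by omega)).1) from by omega)]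
  rw [show ((i : Int) + 1) = ((i + 1 : ℕ) : Int) by push_cast; ring]
  rw [pv_getD_cast pts (i + 1) hi1]

lemma pv_B_step_head (pts : List (Int × Int)) (i : ℕ) (_h1 : 1 ≤ i) (hi : i < pts.length)
    (res : PySem.Dict Int Int) :
    pvBodyB pts ((i : Int) - 1, res) ((pts[i]'hi).1) =
      ((i : Int), res.insert (pts[i]'hi).1 (pts[i]'hi).2) := by
  unfold pvBodyB
  simp only
  rw [show ((i : Int) - 1 + 1) = ((i : ℕ) : Int) by ring]
  rw [pv_getD_cast pts i hi]
  rw [if_pos (show ((i : ℕ) : Int) < (pts.length : Int) ∧ (pts[i]'hi).1 = (pts[i]'hi).1 from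
    ⟨by exact_mod_cast hi, rfl⟩)]
  rw [pv_getD_cast pts i hi]
  rw [if_pos rfl]

lemma pv_B_inner (pts : List (Int × Int)) (i : ℕ) (hi1 : i + 1 < pts.length) :
    ∀ (l : List Int), (∀ j ∈ l, (pts[i]'(by omega)).1 < j ∧ j < pts[i + 1].1) →
    ∀ res : PySem.Dict Int Int,
    l.foldl (pvBodyB pts) ((i : Int), res) =
      ((i : Int), l.foldl (fun r j => r.insert j
        (pvRound ((j - (pts[i]'(by omega)).1) * (pts[i + 1].2 - (pts[i]'(by omega)).2)
          + (pts[i]'(by omega)).2 * (pts[i + 1].1 - (pts[i]'(by omega)).1)) (pts[i + 1].1 - (pts[i]'(by omega)).1))) res) := by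
  intro l
  induction l with
  | nil => intro _ res; rfl
  | cons j t ih =>
      intro hmem res
      rw [List.foldl_cons, List.foldl_cons,
        pv_B_step_mid pts i hi1 j (hmem j (by simp)).1 (hmem j (by simp)).2 res]
      exact ih (fun x hx => hmem x (by simp [hx])) _

lemma pv_B_main (pts : List (Int × Int)) (hpw : pts.Pairwise (fun a b => a.1 < b.1))
    (hrange : ∀ p ∈ pts, pvInRange p)
    (hlast : ∀ h : 0 < pts.length, (pts[pts.length - 1]'(by omega)).1 = 127) :
    ∀ (fuel i : ℕ) (res : PySem.Dict Int Int), 1 ≤ i → (hi : i < pts.length) →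
    pts.length - 1 - i = fuel →
    (∀ k ∈ res.keys, k < (pts[i]'hi).1) →
    ((PySem.List.pyRange ((pts[i]'hi).1) 128).foldl (pvBodyB pts) ((i : Int) - 1, res)).2.items
      = res.items ++ pvBuild (pts.drop i) := by
  intro fuel
  induction fuel with
  | zero =>
      intro i res h1 hi hfuel hkeys
      have hieq : i = pts.length - 1 := by omega
      have h127 : (pts[i]'hi).1 = 127 := by subst hieq; exact hlast (by omega)
      rw [h127, PySem.List.pyRange_one_cons (by norm_num), pv_pyRange_eq_nil (by norm_num),
        List.foldl_cons, List.foldl_nil]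
      rw [show (127 : Int) = (pts[i]'hi).1 from h127.symm, pv_B_step_head pts i h1 hi res]
      simp only
      rw [PySem.Dict.items_insert_of_not_contains _ _ ?_]
      · rw [List.drop_eq_getElem_cons hi, show pts.drop (i + 1) = [] from by
          rw [List.drop_eq_nil_iff]; omega]
        rfl
      · by_contra hcon
        have : (pts[i]'hi).1 ∈ res.keys := by
          rw [← PySem.Dict.contains_iff_mem_keys]
          revert hcon; cases res.contains (pts[i]'hi).1 <;> simp
        have := hkeys _ this
        omega
  | succ fuel ih =>
      intro i res h1 hi hfuel hkeys
      have hi1 : i + 1 < pts.length := by omega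
      set a := (pts[i]'hi).1 with ha
      set c := (pts[i + 1]'hi1).1 with hc
      have hac : a < c := List.pairwise_iff_getElem.1 hpw i (i + 1) hi hi1 (by omega)
      have hc127 : c ≤ 127 := (hrange _ (List.getElem_mem hi1)).1.2
      rw [PySem.List.pyRange_one_append a c 128 (by omega) (by omega), List.foldl_append]
      rw [PySem.List.pyRange_one_cons hac, List.foldl_cons]
      rw [show a = (pts[i]'hi).1 from ha, pv_B_step_head pts i h1 hi res]
      have hmem : ∀ j ∈ PySem.List.pyRange ((pts[i]'hi).1 + 1) c, (pts[i]'hi).1 < j ∧ j < pts[i + 1].1 := by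
        intro j hj
        rw [PySem.List.mem_pyRange_one] at hj
        exact ⟨by omega, by omega⟩
      rw [show c = (pts[i + 1]'hi1).1 from hc] at hmem ⊢
      rw [pv_B_inner pts i hi1 _ hmem _]
      set res1 := (res.insert (pts[i]'hi).1 (pts[i]'hi).2) with hres1
      have hfresh : ∀ j ∈ PySem.List.pyRange ((pts[i]'hi).1 + 1) (pts[i + 1]'hi1).1,
          res1.contains j = false := by
        intro j hj
        rw [PySem.List.mem_pyRange_one] at hj
        by_contra hcon
        have hjk : j ∈ res1.keys := by
          rw [← PySem.Dict.contains_iff_mem_keys]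
          revert hcon; cases res1.contains j <;> simp
        rw [hres1, PySem.Dict.mem_keys_insert] at hjk
        rcases hjk with rfl | hjk
        · omega
        · have := hkeys _ hjk; omega
      have hinner := PySem.Dict.items_foldl_insert_fresh
        (PySem.List.pyRange ((pts[i]'hi).1 + 1) (pts[i + 1]'hi1).1) (fun j => j)
        (fun j => pvRound ((j - (pts[i]'hi).1) * ((pts[i + 1]'hi1).2 - (pts[i]'hi).2)
          + (pts[i]'hi).2 * ((pts[i + 1]'hi1).1 - (pts[i]'hi).1)) ((pts[i + 1]'hi1).1 - (pts[i]'hi).1)) res1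
        hfresh (by rw [List.map_id']; exact pv_pyRange_nodup _ _)
      set res2 := (PySem.List.pyRange ((pts[i]'hi).1 + 1) (pts[i + 1]'hi1).1).foldl
        (fun r j => r.insert j (pvRound ((j - (pts[i]'hi).1) * ((pts[i + 1]'hi1).2 - (pts[i]'hi).2)
          + (pts[i]'hi).2 * ((pts[i + 1]'hi1).1 - (pts[i]'hi).1)) ((pts[i + 1]'hi1).1 - (pts[i]'hi).1))) res1 with hres2
      have hkeys2 : ∀ k ∈ res2.keys, k < (pts[i + 1]'hi1).1 := by
        intro k hk
        rw [hres2] at hk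
        rw [PySem.Dict.keys_foldl_insert _ _ _] at hk
        rw [PySem.Set.mem_update] at hk
        rcases hk with hk | hk
        · rw [hres1, PySem.Dict.mem_keys_insert] at hk
          rcases hk with rfl | hk
          · omega
          · have := hkeys _ hk; omega
        · rw [PySem.List.mem_pyRange_one] at hk; omega
      have hstep := ih (i + 1) res2 (by omega) hi1 (by omega) hkeys2
      rw [show ((i : Int)) = ((i + 1 : ℕ) : Int) - 1 by push_cast; ring]
      rw [hstep]
      rw [hinner, hres1, PySem.Dict.items_insert_of_not_contains _ _ ?_]
      · rw [List.drop_eq_getElem_cons hi, List.drop_eq_getElem_cons hi1]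
        rw [show pvBuild ((pts[i]'hi) :: (pts[i + 1]'hi1) :: pts.drop (i + 2))
            = ((pts[i]'hi) :: pvSeg (pts[i]'hi) (pts[i + 1]'hi1)) ++ pvBuild ((pts[i + 1]'hi1) :: pts.drop (i + 2)) from rfl]
        rw [show ((pts[i]'hi).1, (pts[i]'hi).2) = pts[i]'hi from rfl]
        simp only [pvSeg, List.append_assoc, List.cons_append, List.nil_append]
      · by_contra hcon
        have : (pts[i]'hi).1 ∈ res.keys := by
          rw [← PySem.Dict.contains_iff_mem_keys]
          revert hcon; cases res.contains (pts[i]'hi).1 <;> simp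
        have := hkeys _ this
        omega

lemma pv_getD_cast0 (pts : List (Int × Int)) (h : 0 < pts.length) :
    PySem.List.pyGetD pts (0 : Int) (0, 0) = pts[0] := by
  rw [PySem.List.pyGetD_of_nonneg pts (0, 0) (by norm_num), Int.toNat_zero,
    List.getD_eq_getElem pts _ h]

set_option maxRecDepth 8000 in
lemma pv_B_eq (raw : List (Int × Int)) (hpre : Pre_initialise_vel_curve raw) :
    initialise_vel_curve_alt raw = pvBuild (pvPts raw) := by
  have hg := pv_guard_true raw hpre
  have hpw := pv_pts_pairwise raw
  have hlen := pv_pts_len raw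
  have h1len : 1 < (pvPts raw).length := by omega
  have h0len : 0 < (pvPts raw).length := by omega
  have h0 := pv_pts_head raw hpre
  have hlast := pv_pts_last raw hpre
  have hrange := pv_pts_range raw hpre
  have step0 : initialise_vel_curve_alt raw =
      (if (if (if (PySem.Dict.ofList raw).contains 0 then PySem.Dict.ofList raw else (PySem.Dict.ofList raw).insert 0 0).contains 127 then (if (PySem.Dict.ofList raw).contains 0 then PySem.Dict.ofList raw else (PySem.Dict.ofList raw).insert 0 0) else (if (PySem.Dict.ofList raw).contains 0 then PySem.Dict.ofList raw else (PySem.Dict.ofList raw).insert 0 0).insert 127 127).items.all (fun i => decide ((0 ≤ i.1 ∧ i.1 ≤ 127) ∧ (0 ≤ i.2 ∧ i.2 ≤ 127))) = true then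
        ((PySem.List.pyRange 0 128).foldl (pvBodyB (PySem.List.sorted (if (if (PySem.Dict.ofList raw).contains 0 then PySem.Dict.ofList raw else (PySem.Dict.ofList raw).insert 0 0).contains 127 then (if (PySem.Dict.ofList raw).contains 0 then PySem.Dict.ofList raw else (PySem.Dict.ofList raw).insert 0 0) else (if (PySem.Dict.ofList raw).contains 0 then PySem.Dict.ofList raw else (PySem.Dict.ofList raw).insert 0 0).insert 127 127).items (fun x => x.1))) ((0 : Int), PySem.Dict.empty)).2.items
      else []) := rfl
  rw [show (if (if (PySem.Dict.ofList raw).contains 0 then PySem.Dict.ofList raw else (PySem.Dict.ofList raw).insert 0 0).contains 127 then (if (PySem.Dict.ofList raw).contains 0 then PySem.Dict.ofList raw else (PySem.Dict.ofList raw).insert 0 0) else (if (PySem.Dict.ofList raw).contains 0 then PySem.Dict.ofList raw else (PySem.Dict.ofList raw).insert 0 0).insert 127 127) = pvD2 raw from rfl] at step0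
  rw [show PySem.List.sorted (pvD2 raw).items (fun x => x.1) = pvPts raw from rfl] at step0
  rw [step0, if_pos hg]
  have hk1 : (0 : Int) < ((pvPts raw)[1]'h1len).1 := by
    have := pv_key_mono raw 0 1 one_pos h1len; omega
  have hk1le : ((pvPts raw)[1]'h1len).1 ≤ 127 := (hrange _ (List.getElem_mem h1len)).1.2
  rw [PySem.List.pyRange_one_append 0 (((pvPts raw)[1]'h1len).1) 128 (by omega) (by omega),
    List.foldl_append]
  rw [PySem.List.pyRange_one_cons hk1, List.foldl_cons]
  -- the first step j = 0 copies the first control point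
  have hstep0 : pvBodyB (pvPts raw) ((0 : Int), PySem.Dict.empty) 0 =
      ((0 : Int), PySem.Dict.empty.insert (0 : Int) (((pvPts raw)[0]'h0len).2)) := by
    unfold pvBodyB
    simp only
    rw [show ((0 : Int) + 1) = ((1 : ℕ) : Int) by norm_num]
    rw [pv_getD_cast _ 1 h1len]
    rw [if_neg (show ¬(((1 : ℕ) : Int) < ((pvPts raw).length : Int) ∧ ((pvPts raw)[1]'h1len).1 = 0) from by
      rintro ⟨-, h⟩; omega)]
    rw [pv_getD_cast0 _ h0len]
    rw [if_pos h0.symm]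
  rw [hstep0]
  -- the interior of the first segment keeps the bracketing index at 0
  rw [show PySem.List.pyRange ((0 : Int) + 1) (((pvPts raw)[1]'h1len).1)
      = PySem.List.pyRange (((pvPts raw)[0]'h0len).1 + 1) (((pvPts raw)[1]'h1len).1) from by rw [h0]]
  have hmem0 : ∀ j ∈ PySem.List.pyRange (((pvPts raw)[0]'h0len).1 + 1) (((pvPts raw)[1]'h1len).1),
      ((pvPts raw)[0]'h0len).1 < j ∧ j < ((pvPts raw)[1]'h1len).1 := by
    intro j hj
    rw [PySem.List.mem_pyRange_one] at hj
    exact ⟨by omega, by omega⟩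
  have hinner0 := pv_B_inner (pvPts raw) 0 h1len _ hmem0 (PySem.Dict.empty.insert 0 (((pvPts raw)[0]'h0len).2))
  rw [show (((0 : ℕ) : Int)) = (0 : Int) from rfl] at hinner0
  rw [hinner0]
  set res1 := PySem.Dict.empty.insert (0 : Int) (((pvPts raw)[0]'h0len).2) with hres1
  have hitems1 : res1.items = [((0 : Int), ((pvPts raw)[0]'h0len).2)] := by
    rw [hres1, PySem.Dict.items_insert_of_not_contains _ _ (PySem.Dict.contains_empty _)]
    rfl
  set f0 := fun (j : Int) => pvRound ((j - ((pvPts raw)[0]'h0len).1) * (((pvPts raw)[1]'h1len).2 - ((pvPts raw)[0]'h0len).2)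
    + ((pvPts raw)[0]'h0len).2 * (((pvPts raw)[1]'h1len).1 - ((pvPts raw)[0]'h0len).1)) (((pvPts raw)[1]'h1len).1 - ((pvPts raw)[0]'h0len).1) with hf0
  have hfresh0 : ∀ j ∈ PySem.List.pyRange (((pvPts raw)[0]'h0len).1 + 1) (((pvPts raw)[1]'h1len).1),
      res1.contains j = false := by
    intro j hj
    rw [PySem.List.mem_pyRange_one] at hj
    rw [hres1, PySem.Dict.contains_insert, PySem.Dict.contains_empty, Bool.or_false]
    rw [beq_eq_false_iff_ne]
    omega
  have hinner0items := PySem.Dict.items_foldl_insert_fresh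
    (PySem.List.pyRange (((pvPts raw)[0]'h0len).1 + 1) (((pvPts raw)[1]'h1len).1)) (fun j => j) f0 res1
    hfresh0 (by rw [List.map_id']; exact pv_pyRange_nodup _ _)
  set res2 := (PySem.List.pyRange (((pvPts raw)[0]'h0len).1 + 1) (((pvPts raw)[1]'h1len).1)).foldl
    (fun r j => r.insert j (f0 j)) res1 with hres2
  have hkeys2 : ∀ k ∈ res2.keys, k < ((pvPts raw)[1]'h1len).1 := by
    intro k hk
    rw [hres2, PySem.Dict.keys_foldl_insert _ _ _, PySem.Set.mem_update] at hk
    rcases hk with hk | hk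
    · rw [hres1, PySem.Dict.mem_keys_insert] at hk
      rcases hk with rfl | hk
      · omega
      · rw [show PySem.Dict.empty.keys = ([] : List Int) from rfl] at hk
        exact absurd hk (List.not_mem_nil)
    · rw [PySem.List.mem_pyRange_one] at hk; omega
  have hmain := pv_B_main (pvPts raw) hpw hrange (fun _ => hlast)
    ((pvPts raw).length - 2) 1 res2 le_rfl h1len (by omega) hkeys2
  rw [show (((1 : ℕ) : Int) - 1) = (0 : Int) by norm_num] at hmain
  rw [hmain]
  rw [hres2, hinner0items, hitems1]
  -- assemble: the table is the first control point, its segment, then the rest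
  have hdecomp : pvPts raw = ((pvPts raw)[0]'h0len) :: ((pvPts raw)[1]'h1len) :: (pvPts raw).drop 2 := by
    rw [← List.drop_eq_getElem_cons h1len, ← List.drop_eq_getElem_cons h0len, List.drop_zero]
  rw [show (pvPts raw).drop 1 = ((pvPts raw)[1]'h1len) :: (pvPts raw).drop 2 from
    List.drop_eq_getElem_cons h1len]
  conv_rhs => rw [hdecomp]
  rw [show pvBuild (((pvPts raw)[0]'h0len) :: ((pvPts raw)[1]'h1len) :: (pvPts raw).drop 2)
      = (((pvPts raw)[0]'h0len) :: pvSeg ((pvPts raw)[0]'h0len) ((pvPts raw)[1]'h1len))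
        ++ pvBuild (((pvPts raw)[1]'h1len) :: (pvPts raw).drop 2) from rfl]
  rw [show ((0 : Int), ((pvPts raw)[0]'h0len).2) = (pvPts raw)[0]'h0len from by
    rw [← h0]]
  simp only [pvSeg, hf0, List.cons_append, List.nil_append]

-- ===== VERDICT (by name: the statement is the Claim_ definition above) =====
theorem initialise_vel_curve_spec : Claim_equal_initialise_vel_curve := by
  intro raw _ hpre
  unfold Spec_initialise_vel_curve
  rw [pv_A_eq raw hpre, pv_B_eq raw hpre]
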